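-- pv_equiv track=rewrite | github.com/AbdulRazak5764/Email_analyzer | email-prioritization/scripts/email_analyzer.py | parse_email_data
-- ===== SOURCE A (Python) =====
-- from typing import Dict, List, Tuple
--
-- def parse_email_data(data: str) -> List[Dict]:
--     """Parse email data from text format"""
--     emails = []
--     lines = data.strip().split('\n')
--
--     current_email = {}
--     current_field = None
--
--     for line in lines:
--         line = line.strip()
--         if not line:
--             if current_email:
--                 emails.append(current_email)
--                 current_email = {}
--             continue
--
--         if line.startswith('From:'):
--             current_email['sender'] = line.replace('From:', '').strip()
--             current_field = 'sender'
--         elif line.startswith('Subject:'):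
--             current_email['subject'] = line.replace('Subject:', '').strip()
--             current_field = 'subject'
--         elif line.startswith('Body:'):
--             current_email['body'] = line.replace('Body:', '').strip()
--             current_field = 'body'
--         else:
--             # Continue previous field if it's multi-line
--             if current_field and current_field in current_email:
--                 current_email[current_field] += " " + line
--
--     # Add the last email if exists
--     if current_email:
--         emails.append(current_email)
--
--     return emails
-- ===== SOURCE B (Python) =====
-- def _header(line):
--     if line.startswith('From:'):
--         return 'sender', line.replace('From:', '').strip()
--     if line.startswith('Subject:'):
--         return 'subject', line.replace('Subject:', '').strip()
--     if line.startswith('Body:'):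
--         return 'body', line.replace('Body:', '').strip()
--     return None
--
-- def parse_email_data(data):
--     # pass 1: split the stripped input into blocks of non-empty stripped lines
--     lines = [ln.strip() for ln in data.strip().split('\n')]
--     blocks = []
--     cur = []
--     for ln in lines:
--         if not ln:
--             if cur:
--                 blocks.append(cur)
--                 cur = []
--         else:
--             cur.append(ln)
--     if cur:
--         blocks.append(cur)
--     # pass 2: parse each block independently
--     emails = []
--     for block in blocks:
--         email = {}
--         field = None
--         for ln in block:
--             h = _header(ln)
--             if h is not None:
--                 key, value = h
--                 email[key] = value
--                 field = key
--             elif field and field in email: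
--                 email[field] += " " + ln
--         if email:
--             emails.append(email)
--     return emails
-- ===== Notes on version B (the rewrite author's own statement) =====
-- stated objective: alternative
-- what changed: A parses with one stateful loop carrying (emails, current_email, current_field) across the whole text; B first splits the stripped lines into blank-separated blocks and then parses each block independently with a small header/continuation helper.
import Mathlib
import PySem

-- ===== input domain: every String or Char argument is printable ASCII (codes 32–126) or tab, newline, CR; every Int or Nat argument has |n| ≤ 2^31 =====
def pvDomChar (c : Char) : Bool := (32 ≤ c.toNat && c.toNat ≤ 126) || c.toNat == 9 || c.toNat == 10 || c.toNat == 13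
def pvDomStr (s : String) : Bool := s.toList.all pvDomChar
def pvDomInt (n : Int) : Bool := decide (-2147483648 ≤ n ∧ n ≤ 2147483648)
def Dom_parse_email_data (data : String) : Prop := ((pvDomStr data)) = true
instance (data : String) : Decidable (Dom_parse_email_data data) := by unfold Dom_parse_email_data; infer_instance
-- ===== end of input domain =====

-- B re-decomposes A's single stateful loop into two passes (split the stripped lines into blank-separated blocks, then parse each block on its own); same return value, objective: alternative decomposition.

-- ===== PORT A =====
-- body of A's loop, applied to the already-stripped line (A strips at the top of the loop body)
def pvStepA (st : List (PySem.Dict String String) × PySem.Dict String String × Option String)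
    (line : String) : List (PySem.Dict String String) × PySem.Dict String String × Option String :=
  if line = "" then
    (if st.2.1.items = [] then st else (st.1 ++ [st.2.1], PySem.Dict.empty, st.2.2))
  else if PySem.Str.startswith line "From:" then
    (st.1, (st.2.1).insert "sender" (PySem.Str.strip (PySem.Str.replace line "From:" "")), some "sender")
  else if PySem.Str.startswith line "Subject:" then
    (st.1, (st.2.1).insert "subject" (PySem.Str.strip (PySem.Str.replace line "Subject:" "")), some "subject")
  else if PySem.Str.startswith line "Body:" then
    (st.1, (st.2.1).insert "body" (PySem.Str.strip (PySem.Str.replace line "Body:" "")), some "body")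
  else
    match st.2.2 with
    | some f => if f != "" && (st.2.1).contains f then
        (st.1, (st.2.1).modify f "" (fun v => v ++ " " ++ line), st.2.2)
      else st
    | none => st

-- data.strip().split('\n'): the separator is the literal "\n" ≠ "", so split? is always `some`
def parse_email_data (data : String) : List (List (String × String)) :=
  let lines := (PySem.Str.split? (PySem.Str.strip data) "\n").getD []
  let st := lines.foldl (fun st line => pvStepA st (PySem.Str.strip line))
    ([], PySem.Dict.empty, none)
  (if st.2.1.items = [] then st.1 else st.1 ++ [st.2.1]).map (·.items)

-- ===== PORT B =====
def pvHeaderOf (line : String) : Option (String × String) :=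
  if PySem.Str.startswith line "From:" then
    some ("sender", PySem.Str.strip (PySem.Str.replace line "From:" ""))
  else if PySem.Str.startswith line "Subject:" then
    some ("subject", PySem.Str.strip (PySem.Str.replace line "Subject:" ""))
  else if PySem.Str.startswith line "Body:" then
    some ("body", PySem.Str.strip (PySem.Str.replace line "Body:" ""))
  else none

def pvBlockStep (p : List (List String) × List String) (line : String) :
    List (List String) × List String :=
  if line = "" then (if p.2 = [] then p else (p.1 ++ [p.2], []))
  else (p.1, p.2 ++ [line])

def pvBlocks (ls : List String) : List (List String) :=
  let p := ls.foldl pvBlockStep ([], [])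
  p.1 ++ (if p.2 = [] then [] else [p.2])

def pvParseStep (p : PySem.Dict String String × Option String) (line : String) :
    PySem.Dict String String × Option String :=
  match pvHeaderOf line with
  | some kv => (p.1.insert kv.1 kv.2, some kv.1)
  | none =>
    match p.2 with
    | some f => if f != "" && p.1.contains f then
        (p.1.modify f "" (fun v => v ++ " " ++ line), p.2)
      else p
    | none => p

def pvParseBlock (b : List String) : PySem.Dict String String :=
  (b.foldl pvParseStep (PySem.Dict.empty, none)).1

def parse_email_data_alt (data : String) : List (List (String × String)) :=
  let ls := ((PySem.Str.split? (PySem.Str.strip data) "\n").getD []).map PySem.Str.strip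
  (((pvBlocks ls).map pvParseBlock).filter (fun d => !(d.items == []))).map (·.items)

-- ===== PRECONDITION & SPEC =====
def Spec_parse_email_data (data : String) (out : List (List (String × String))) : Prop := out = parse_email_data_alt data
instance (data : String) (out : List (List (String × String))) : Decidable (Spec_parse_email_data data out) := by unfold Spec_parse_email_data; infer_instance

-- ===== CLAIM (what is proved, stated in full; the proofs are below) =====
def Claim_equal_parse_email_data : Prop := ∀ (data : String), Dom_parse_email_data data → Spec_parse_email_data data (parse_email_data data)

-- ===== LEMMAS AND PROOFS =====

-- A's final packaging of its loop state
def pvFinA (st : List (PySem.Dict String String) × PySem.Dict String String × Option String) :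
    List (List (String × String)) :=
  (if st.2.1.items = [] then st.1 else st.1 ++ [st.2.1]).map (·.items)

-- B's block pass started with a partially accumulated block `cur`
def pvBlocksFrom (cur : List String) (ls : List String) : List (List String) :=
  let p := ls.foldl pvBlockStep ([], cur)
  p.1 ++ (if p.2 = [] then [] else [p.2])

-- B's final result from a partially accumulated block `cur` and remaining lines `ls`
def pvFinB (cur : List String) (ls : List String) : List (List (String × String)) :=
  (((pvBlocksFrom cur ls).map pvParseBlock).filter (fun d => !(d.items == []))).map (·.items)

lemma pvDict_items_empty : (PySem.Dict.empty : PySem.Dict String String).items = [] := rfl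

lemma pvDict_eq_empty_of_items_eq_nil {e : PySem.Dict String String} (h : e.items = []) :
    e = PySem.Dict.empty := PySem.Dict.ext (by simp [h, pvDict_items_empty])

lemma pvContains_false_of_items_eq_nil {e : PySem.Dict String String} (h : e.items = [])
    (k : String) : e.contains k = false := by
  rw [pvDict_eq_empty_of_items_eq_nil h]; simp [pysem]

lemma pvBlockStep_blank_nil (bs : List (List String)) :
    pvBlockStep (bs, ([] : List String)) "" = (bs, []) := by simp [pvBlockStep]

lemma pvBlockStep_blank {cur : List String} (hc : cur ≠ []) (bs : List (List String)) :
    pvBlockStep (bs, cur) "" = (bs ++ [cur], []) := by simp [pvBlockStep, hc]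

lemma pvBlockStep_line {l : String} (hl : l ≠ "") (bs : List (List String)) (cur : List String) :
    pvBlockStep (bs, cur) l = (bs, cur ++ [l]) := by simp [pvBlockStep, hl]

lemma pvBlocks_acc (ls : List String) (bs : List (List String)) (cur : List String) :
    ls.foldl pvBlockStep (bs, cur)
      = (bs ++ (ls.foldl pvBlockStep ([], cur)).1, (ls.foldl pvBlockStep ([], cur)).2) := by
  induction ls generalizing bs cur with
  | nil => simp
  | cons l ls ih =>
    simp only [List.foldl_cons]
    by_cases hl : l = ""
    · subst hl
      by_cases hc : cur = []
      · subst hc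
        rw [pvBlockStep_blank_nil bs, pvBlockStep_blank_nil [], ih bs []]
      · rw [pvBlockStep_blank hc bs, pvBlockStep_blank hc [], ih (bs ++ [cur]) [], ih ([] ++ [cur]) []]
        simp
    · rw [pvBlockStep_line hl bs cur, pvBlockStep_line hl [] cur, ih bs (cur ++ [l]),
        ih [] (cur ++ [l])]

lemma pvBlocksFrom_cons_blank_nil (ls : List String) :
    pvBlocksFrom [] ("" :: ls) = pvBlocksFrom [] ls := by
  simp only [pvBlocksFrom, List.foldl_cons, pvBlockStep_blank_nil]

lemma pvBlocksFrom_cons_blank {cur : List String} (hc : cur ≠ []) (ls : List String) :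
    pvBlocksFrom cur ("" :: ls) = cur :: pvBlocksFrom [] ls := by
  simp only [pvBlocksFrom, List.foldl_cons, pvBlockStep_blank hc, List.nil_append]
  rw [pvBlocks_acc ls [cur] []]
  simp

lemma pvBlocksFrom_cons {l : String} (hl : l ≠ "") (cur ls : List String) :
    pvBlocksFrom cur (l :: ls) = pvBlocksFrom (cur ++ [l]) ls := by
  simp only [pvBlocksFrom, List.foldl_cons, pvBlockStep_line hl]

lemma pvFinB_cons_blank_nil (ls : List String) : pvFinB [] ("" :: ls) = pvFinB [] ls := by
  simp [pvFinB, pvBlocksFrom_cons_blank_nil]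

lemma pvFinB_cons_blank {cur : List String} (hc : cur ≠ []) (ls : List String) :
    pvFinB cur ("" :: ls)
      = (if (pvParseBlock cur).items = [] then [] else [(pvParseBlock cur).items])
          ++ pvFinB [] ls := by
  simp only [pvFinB, pvBlocksFrom_cons_blank hc ls, List.map_cons, List.filter_cons]
  by_cases h : (pvParseBlock cur).items = [] <;> simp [h]

lemma pvFinB_cons {l : String} (hl : l ≠ "") (cur ls : List String) :
    pvFinB cur (l :: ls) = pvFinB (cur ++ [l]) ls := by
  simp [pvFinB, pvBlocksFrom_cons hl]

lemma pvMain (ls : List String) (cur : List String) (es : List (PySem.Dict String String))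
    (e : PySem.Dict String String) (f : Option String)
    (hE : (cur.foldl pvParseStep (PySem.Dict.empty, none)).1 = e)
    (hF : e.items ≠ [] → (cur.foldl pvParseStep (PySem.Dict.empty, none)).2 = f) :
    pvFinA (ls.foldl pvStepA (es, e, f)) = es.map (·.items) ++ pvFinB cur ls := by
  induction ls generalizing cur es e f with
  | nil =>
    by_cases hc : cur = []
    · subst hc
      have he : e = PySem.Dict.empty := hE.symm
      subst he
      simp [pvFinA, pvFinB, pvBlocksFrom, pvDict_items_empty]
    · have hpb : pvParseBlock cur = e := by rw [pvParseBlock, hE]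
      by_cases h : e.items = [] <;>
        simp [pvFinA, pvFinB, pvBlocksFrom, hc, hpb, h]
  | cons l ls ih =>
    simp only [List.foldl_cons]
    by_cases hl : l = ""
    · subst hl
      by_cases h : e.items = []
      · -- current email empty: A does nothing, B's current block parses to nothing
        have he : e = PySem.Dict.empty := pvDict_eq_empty_of_items_eq_nil h
        subst he
        have hA : pvStepA (es, PySem.Dict.empty, f) "" = (es, PySem.Dict.empty, f) := by
          simp [pvStepA, pvDict_items_empty]
        rw [hA]
        by_cases hc : cur = []
        · subst hc
          rw [pvFinB_cons_blank_nil]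
          exact ih [] es PySem.Dict.empty f rfl (by simp [pvDict_items_empty])
        · rw [pvFinB_cons_blank hc]
          have hpb : pvParseBlock cur = PySem.Dict.empty := by rw [pvParseBlock, hE]
          rw [hpb, if_pos pvDict_items_empty, List.nil_append]
          exact ih [] es PySem.Dict.empty f rfl (by simp [pvDict_items_empty])
      · -- current email nonempty: A flushes it; B closes the current block
        have hc : cur ≠ [] := by
          intro hc; subst hc
          exact h (hE ▸ pvDict_items_empty)
        have hA : pvStepA (es, e, f) "" = (es ++ [e], PySem.Dict.empty, f) := by
          simp [pvStepA, h]
        rw [hA, pvFinB_cons_blank hc]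
        have hpb : pvParseBlock cur = e := by rw [pvParseBlock, hE]
        rw [hpb, if_neg h]
        rw [ih [] (es ++ [e]) PySem.Dict.empty f rfl (by simp [pvDict_items_empty])]
        simp
    · -- non-blank line
      have hfold : (cur ++ [l]).foldl pvParseStep (PySem.Dict.empty, none)
          = pvParseStep (cur.foldl pvParseStep (PySem.Dict.empty, none)) l := by
        rw [List.foldl_append]; rfl
      rw [pvFinB_cons hl]
      by_cases h1 : PySem.Str.startswith l "From:" = true
      · have hhdr : pvHeaderOf l
            = some ("sender", PySem.Str.strip (PySem.Str.replace l "From:" "")) := by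
          simp only [pvHeaderOf, if_pos h1]
        have hA : pvStepA (es, e, f) l
            = (es, e.insert "sender" (PySem.Str.strip (PySem.Str.replace l "From:" "")),
               some "sender") := by
          simp only [pvStepA, if_neg hl, if_pos h1]
        rw [hA]
        refine ih (cur ++ [l]) es _ (some "sender") ?_ (fun _ => ?_) <;>
          rw [hfold] <;> simp only [pvParseStep, hhdr, hE]
      · by_cases h2 : PySem.Str.startswith l "Subject:" = true
        · have hhdr : pvHeaderOf l
              = some ("subject", PySem.Str.strip (PySem.Str.replace l "Subject:" "")) := by
            simp only [pvHeaderOf, if_neg h1, if_pos h2]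
          have hA : pvStepA (es, e, f) l
              = (es, e.insert "subject" (PySem.Str.strip (PySem.Str.replace l "Subject:" "")),
                 some "subject") := by
            simp only [pvStepA, if_neg hl, if_neg h1, if_pos h2]
          rw [hA]
          refine ih (cur ++ [l]) es _ (some "subject") ?_ (fun _ => ?_) <;>
            rw [hfold] <;> simp only [pvParseStep, hhdr, hE]
        · by_cases h3 : PySem.Str.startswith l "Body:" = true
          · have hhdr : pvHeaderOf l
                = some ("body", PySem.Str.strip (PySem.Str.replace l "Body:" "")) := by
              simp only [pvHeaderOf, if_neg h1, if_neg h2, if_pos h3]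
            have hA : pvStepA (es, e, f) l
                = (es, e.insert "body" (PySem.Str.strip (PySem.Str.replace l "Body:" "")),
                   some "body") := by
              simp only [pvStepA, if_neg hl, if_neg h1, if_neg h2, if_pos h3]
            rw [hA]
            refine ih (cur ++ [l]) es _ (some "body") ?_ (fun _ => ?_) <;>
              rw [hfold] <;> simp only [pvParseStep, hhdr, hE]
          · -- continuation line
            have hdr : pvHeaderOf l = none := by
              simp only [pvHeaderOf, if_neg h1, if_neg h2, if_neg h3]
            by_cases h : e.items = []
            · -- empty current email: both sides ignore the line
              have hA : pvStepA (es, e, f) l = (es, e, f) := by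
                simp only [pvStepA, if_neg hl, if_neg h1, if_neg h2, if_neg h3]
                cases f with
                | none => rfl
                | some k => simp [pvContains_false_of_items_eq_nil h k]
              have hB : pvParseStep (cur.foldl pvParseStep (PySem.Dict.empty, none)) l
                  = cur.foldl pvParseStep (PySem.Dict.empty, none) := by
                cases hg2 : (cur.foldl pvParseStep (PySem.Dict.empty, none)).2 with
                | none => simp only [pvParseStep, hdr, hg2]
                | some k =>
                  simp [pvParseStep, hdr, hg2, hE, pvContains_false_of_items_eq_nil h k]
              rw [hA]
              refine ih (cur ++ [l]) es e f ?_ (fun hne => absurd hne (by simp [h]))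
              rw [hfold, hB, hE]
            · -- nonempty current email: A's field equals B's field
              have hf : (cur.foldl pvParseStep (PySem.Dict.empty, none)).2 = f := hF h
              cases f with
              | none =>
                have hA : pvStepA (es, e, (none : Option String)) l = (es, e, none) := by
                  simp only [pvStepA, if_neg hl, if_neg h1, if_neg h2, if_neg h3]
                rw [hA]
                refine ih (cur ++ [l]) es e none ?_ (fun _ => ?_) <;>
                  rw [hfold] <;> simp only [pvParseStep, hdr, hf, hE]
              | some k =>
                by_cases hg : (k != "" && e.contains k) = true
                · have hA : pvStepA (es, e, some k) l
                      = (es, e.modify k "" (fun v => v ++ " " ++ l), some k) := by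
                    simp only [pvStepA, if_neg hl, if_neg h1, if_neg h2, if_neg h3]
                    simp only [if_pos hg]
                  rw [hA]
                  refine ih (cur ++ [l]) es _ (some k) ?_ (fun _ => ?_) <;>
                    rw [hfold] <;> simp only [pvParseStep, hdr, hf, hE, if_pos hg]
                · have hA : pvStepA (es, e, some k) l = (es, e, some k) := by
                    simp only [pvStepA, if_neg hl, if_neg h1, if_neg h2, if_neg h3]
                    simp only [if_neg hg]
                  rw [hA]
                  refine ih (cur ++ [l]) es e (some k) ?_ (fun _ => ?_) <;>
                    rw [hfold] <;> simp only [pvParseStep, hdr, hf, hE, if_neg hg]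

-- ===== VERDICT (by name: the statement is the Claim_ definition above) =====
theorem parse_email_data_spec : Claim_equal_parse_email_data := by
  intro data _
  show parse_email_data data = parse_email_data_alt data
  unfold parse_email_data parse_email_data_alt
  dsimp only
  rw [← List.foldl_map (f := PySem.Str.strip) (g := pvStepA)]
  have := pvMain (((PySem.Str.split? (PySem.Str.strip data) "\n").getD []).map PySem.Str.strip)
    [] [] PySem.Dict.empty none rfl (by simp [pvDict_items_empty])
  simpa [pvFinA, pvFinB, pvBlocksFrom, pvBlocks] using this
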